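-- pv_equiv track=rewrite | github.com/ThiruDev50/DataStructuresAndAlgorithms | PythonThree/Leetcode/Problems/List/E - Find the town judge.py | solution
-- ===== SOURCE A (Python) =====
-- from typing import List
--
-- def solution(n: int, trust: List[List[int]]) -> int:
--     d={}
--     for i in range(1,n+1):
--         d[i]=set()
--     for i in trust:
--         d.get(i[0]).add(i[1])
--     judge=None
--     for key,value in d.items():
--         if len(value)==0:
--             judge=key
--             break
--     if not judge:
--         return -1
--     for key,value in d.items():
--         if key==judge:
--             if (judge in value):
--                 return -1
--             continue
--         if judge not in value:
--             return -1
--     return judge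
-- ===== SOURCE B (Python) =====
-- def solution(n, trust):
--     # Count in/out degrees over the DISTINCT trust pairs, then pick the person
--     # whose degrees say "trusts nobody, trusted by everyone else".
--     pairs = {(t[0], t[1]) for t in trust}
--     outdeg = {}
--     for a, b in pairs:
--         outdeg[a] = outdeg.get(a, 0) + 1
--     indeg = {}
--     for a, b in pairs:
--         indeg[b] = indeg.get(b, 0) + 1
--     for p in range(1, n + 1):
--         if outdeg.get(p, 0) == 0 and indeg.get(p, 0) == n - 1:
--             return p
--     return -1
-- ===== Notes on version B (the rewrite author's own statement) =====
-- stated objective: alternative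
-- what changed: B replaces A's dict of per-person outgoing-trust sets and its candidate-then-verify loops by degree counting: it dedupes the trust pairs and builds in/out-degree counters, returning the first person with out-degree 0 and in-degree n-1, with no candidate selection or verification pass.
import Mathlib
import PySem

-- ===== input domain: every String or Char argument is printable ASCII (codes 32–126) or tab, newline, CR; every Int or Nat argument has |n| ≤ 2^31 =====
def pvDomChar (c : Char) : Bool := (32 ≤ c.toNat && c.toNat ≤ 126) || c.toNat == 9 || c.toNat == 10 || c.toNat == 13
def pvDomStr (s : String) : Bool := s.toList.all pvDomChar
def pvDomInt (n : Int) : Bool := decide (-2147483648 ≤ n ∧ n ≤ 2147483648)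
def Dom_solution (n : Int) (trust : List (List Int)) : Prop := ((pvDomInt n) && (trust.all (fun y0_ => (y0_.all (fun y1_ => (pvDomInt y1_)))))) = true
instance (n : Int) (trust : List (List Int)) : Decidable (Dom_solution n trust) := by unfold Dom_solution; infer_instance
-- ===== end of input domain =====

-- B replaces A's dict of per-person outgoing-trust sets and its candidate-then-verify loops by
-- degree counting over the deduplicated trust pairs (objective: alternative).

-- ===== PORT A =====
def pvFst (t : List Int) : Int := PySem.List.pyGetD t 0 0   -- t[0] (Pre_ guarantees the index exists)
def pvSnd (t : List Int) : Int := PySem.List.pyGetD t 1 0   -- t[1]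

-- 'for key,value in d.items(): if len(value)==0: judge=key; break'
def pvFindEmptyA : List (Int × PySem.Set Int) → Option Int
  | [] => none
  | (k, v) :: rest => if PySem.Set.len v == 0 then some k else pvFindEmptyA rest

-- A's final verification loop over d.items(), returning -1 early or judge at the end
def pvVerifyA (j : Int) : List (Int × PySem.Set Int) → Int
  | [] => j
  | (k, v) :: rest =>
      if k == j then
        (if PySem.Set.contains v j then -1 else pvVerifyA j rest)
      else
        (if PySem.Set.contains v j then pvVerifyA j rest else -1)

def solution (n : Int) (trust : List (List Int)) : Int :=
  let d0 : PySem.Dict Int (PySem.Set Int) :=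
    (PySem.List.pyRange 1 (n+1)).foldl (fun d i => d.insert i PySem.Set.empty) PySem.Dict.empty
  -- 'd.get(i[0]).add(i[1])' mutates the stored set in place; Pre_ guarantees the key exists
  let d : PySem.Dict Int (PySem.Set Int) :=
    trust.foldl (fun d i => d.modify (pvFst i) PySem.Set.empty (fun s => PySem.Set.add s (pvSnd i))) d0
  match pvFindEmptyA d.items with
  | none => -1
  | some judge =>
      if judge == 0 then -1   -- Python: 'if not judge' is also true for judge == 0
      else pvVerifyA judge d.items

-- ===== PORT B =====
-- 'for p in range(1, n+1): if outdeg.get(p,0)==0 and indeg.get(p,0)==n-1: return p' / 'return -1'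
def pvFindB (n : Int) (od ind : PySem.Dict Int Int) : List Int → Int
  | [] => -1
  | p :: rest =>
      if od.getD p 0 == 0 && ind.getD p 0 == n - 1 then p else pvFindB n od ind rest

def solution_alt (n : Int) (trust : List (List Int)) : Int :=
  let pairs : PySem.Set (Int × Int) :=
    PySem.Set.ofList (trust.map (fun t => (pvFst t, pvSnd t)))
  let outdeg : PySem.Dict Int Int :=
    pairs.foldl (fun d q => d.insert q.1 (d.getD q.1 0 + 1)) PySem.Dict.empty
  let indeg : PySem.Dict Int Int :=
    pairs.foldl (fun d q => d.insert q.2 (d.getD q.2 0 + 1)) PySem.Dict.empty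
  pvFindB n outdeg indeg (PySem.List.pyRange 1 (n+1))

-- ===== PRECONDITION & SPEC =====
-- Pre_ excludes exactly the inputs on which A raises: a trust pair shorter than 2 (IndexError) or a
-- truster outside 1..n (d.get returns None, AttributeError).
def Pre_solution (n : Int) (trust : List (List Int)) : Prop :=
  ∀ t ∈ trust, 2 ≤ t.length ∧ 1 ≤ pvFst t ∧ pvFst t ≤ n
instance (n : Int) (trust : List (List Int)) : Decidable (Pre_solution n trust) := by unfold Pre_solution; infer_instance
def pvWitness_solution : Int × List (List Int) := (2, [[1, 2]])

def Spec_solution (n : Int) (trust : List (List Int)) (out : Int) : Prop := out = solution_alt n trust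
instance (n : Int) (trust : List (List Int)) (out : Int) : Decidable (Spec_solution n trust out) := by unfold Spec_solution; infer_instance

-- ===== CLAIM (what is proved, stated in full; the proofs are below) =====
def Claim_equal_solution : Prop := ∀ (n : Int) (trust : List (List Int)), Dom_solution n trust → Pre_solution n trust → Spec_solution n trust (solution n trust)

-- ===== LEMMAS AND PROOFS =====
theorem pv_nodup_range (n : Int) : (PySem.List.pyRange 1 (n+1)).Nodup :=
  PySem.List.nodup_pyRange_one 1 (n+1)

theorem pv_getD_d0 (l : List Int) (d : PySem.Dict Int (PySem.Set Int))
    (h : ∀ j, d.getD j PySem.Set.empty = PySem.Set.empty) (k : Int) :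
    (l.foldl (fun d i => d.insert i PySem.Set.empty) d).getD k PySem.Set.empty = PySem.Set.empty := by
  induction l generalizing d with
  | nil => simpa using h k
  | cons i l ih =>
      simp only [List.foldl_cons]
      exact ih _ (fun j => by rw [PySem.Dict.getD_insert]; split; · rfl
                              · exact h j)

theorem pv_mem_fold (trust : List (List Int)) (d : PySem.Dict Int (PySem.Set Int)) (k x : Int) :
    x ∈ (trust.foldl (fun d i => d.modify (pvFst i) PySem.Set.empty (fun s => PySem.Set.add s (pvSnd i))) d).getD k PySem.Set.empty
      ↔ x ∈ d.getD k PySem.Set.empty ∨ ∃ t ∈ trust, pvFst t = k ∧ pvSnd t = x := by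
  induction trust generalizing d with
  | nil => simp
  | cons t ts ih =>
      simp only [List.foldl_cons, ih, PySem.Dict.getD_modify]
      by_cases hk : k = pvFst t
      · subst hk; simp [PySem.Set.mem_add]; tauto
      · rw [if_neg hk]
        constructor
        · rintro (h | ⟨u, hu, h1, h2⟩)
          · exact Or.inl h
          · exact Or.inr ⟨u, List.mem_cons_of_mem _ hu, h1, h2⟩
        · rintro (h | ⟨u, hu, h1, h2⟩)
          · exact Or.inl h
          · rcases List.mem_cons.mp hu with rfl | hu
            · exact absurd h1.symm hk
            · exact Or.inr ⟨u, hu, h1, h2⟩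

theorem pv_findEmptyA_eq (out : Int → PySem.Set Int) (l : List Int) :
    pvFindEmptyA (l.map (fun k => (k, out k))) = l.find? (fun k => PySem.Set.len (out k) == 0) := by
  induction l with
  | nil => rfl
  | cons k l ih =>
      simp only [List.map_cons, pvFindEmptyA, List.find?_cons]
      cases h : (PySem.Set.len (out k) == 0 : Bool)
      · simp [h, ih]
      · simp [h]

theorem pv_verifyA_eq (j : Int) (out : Int → PySem.Set Int) (l : List Int) :
    pvVerifyA j (l.map (fun k => (k, out k)))
      = if l.all (fun k => if k == j then !(PySem.Set.contains (out k) j) else PySem.Set.contains (out k) j) then j else -1 := by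
  induction l with
  | nil => simp [pvVerifyA]
  | cons k l ih =>
      simp only [List.map_cons, pvVerifyA, List.all_cons, ih]
      by_cases hk : k = j
      · subst hk
        by_cases hc : k ∈ out k <;> simp [hc]
      · by_cases hc : j ∈ out k <;> simp [beq_iff_eq, hk, hc]

theorem pv_findB_eq (n : Int) (od ind : PySem.Dict Int Int) (l : List Int) :
    pvFindB n od ind l
      = (l.find? (fun p => od.getD p 0 == 0 && ind.getD p 0 == n - 1)).getD (-1) := by
  induction l with
  | nil => rfl
  | cons p l ih =>
      simp only [pvFindB, List.find?_cons]
      cases h : (od.getD p 0 == 0 && ind.getD p 0 == n - 1 : Bool)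
      · simp [h, ih]
      · simp [h]

theorem pv_find?_congr {α : Type} (p q : α → Bool) (l : List α)
    (h : ∀ x ∈ l, p x = q x) : l.find? p = l.find? q := by
  induction l with
  | nil => rfl
  | cons x l ih =>
      simp only [List.find?_cons, h x List.mem_cons_self]
      cases q x
      · exact ih (fun y hy => h y (List.mem_cons_of_mem _ hy))
      · rfl

-- cardinality core: for p ∈ [1,n] with no outgoing pair, 'in-degree = n-1' says exactly
-- 'every other person of [1,n] trusts p'
theorem pv_card_iff (n p : Int) (pairs : List (Int × Int))
    (hnd : pairs.Nodup)
    (hfst : ∀ q ∈ pairs, 1 ≤ q.1 ∧ q.1 ≤ n)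
    (hp : p ∈ PySem.List.pyRange 1 (n+1))
    (hEp : ∀ b : Int, (p, b) ∉ pairs) :
    (((pairs.map Prod.snd).count p : Int) = n - 1)
      ↔ ∀ k ∈ PySem.List.pyRange 1 (n+1), k ≠ p → (k, p) ∈ pairs := by
  have hp' := (PySem.List.mem_pyRange_one).mp hp
  have hn1 : 1 ≤ n := by omega
  set R := PySem.List.pyRange 1 (n+1) with hR
  have hRnd : R.Nodup := pv_nodup_range n
  have hRlen : R.length = n.toNat := by
    rw [hR, PySem.List.length_pyRange_one]; omega
  set F := (pairs.filter (fun q => q.2 == p)).map Prod.fst with hF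
  have hcount : (pairs.map Prod.snd).count p = F.length := by
    rw [hF, List.length_map, List.count_eq_countP, List.countP_map, List.countP_eq_length_filter]
    rfl
  have hFmem : ∀ a : Int, a ∈ F ↔ (a, p) ∈ pairs := by
    intro a
    rw [hF]
    simp only [List.mem_map, List.mem_filter, beq_iff_eq]
    constructor
    · rintro ⟨q, ⟨hq, h2⟩, h1⟩
      have : q = (a, p) := by
        cases q; simp_all
      exact this ▸ hq
    · intro h
      exact ⟨(a, p), ⟨h, rfl⟩, rfl⟩
  have hFnd : F.Nodup := by
    rw [hF]
    refine List.Nodup.map_on ?_ (hnd.filter _)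
    intro x hx y hy hxy
    have hx2 : x.2 = p := by simpa using (List.mem_filter.mp hx).2
    have hy2 : y.2 = p := by simpa using (List.mem_filter.mp hy).2
    cases x; cases y; simp_all
  have hpF : p ∉ F := fun h => hEp p ((hFmem p).mp h)
  have hnd' : (p :: F).Nodup := List.nodup_cons.mpr ⟨hpF, hFnd⟩
  have hsub : (p :: F) ⊆ R := by
    intro a ha
    rcases List.mem_cons.mp ha with rfl | ha
    · exact hp
    · have := hfst _ ((hFmem a).mp ha)
      exact (PySem.List.mem_pyRange_one).mpr (by omega)
  constructor
  · intro hlen k hk hkp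
    have hFlen : F.length = n.toNat - 1 := by omega
    have hlen' : R.length ≤ (p :: F).length := by
      simp [hRlen, hFlen]; omega
    have hperm : List.Perm (p :: F) R :=
      (List.subperm_of_subset hnd' hsub).perm_of_length_le hlen'
    have hkmem : k ∈ p :: F := hperm.mem_iff.mpr hk
    rcases List.mem_cons.mp hkmem with rfl | hkF
    · exact absurd rfl hkp
    · exact (hFmem k).mp hkF
  · intro hall
    have hsub' : R ⊆ (p :: F) := by
      intro k hk
      by_cases hkp : k = p
      · exact hkp ▸ List.mem_cons_self
      · exact List.mem_cons_of_mem _ ((hFmem k).mpr (hall k hk hkp))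
    have hperm : List.Perm (p :: F) R :=
      (List.perm_ext_iff_of_nodup hnd' hRnd).mpr (fun a => ⟨fun h => hsub h, fun h => hsub' h⟩)
    have := hperm.length_eq
    simp only [List.length_cons, hRlen] at this
    omega

theorem pv_foldl_comp {α β γ : Type} (f : γ → β) (g : α → β → α) (l : List γ) (init : α) :
    l.foldl (fun a c => g a (f c)) init = (l.map f).foldl g init := by
  induction l generalizing init with
  | nil => rfl
  | cons c l ih => simp only [List.foldl_cons, List.map_cons, ih]

theorem pv_main (n : Int) (trust : List (List Int)) (hpre : Pre_solution n trust) :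
    solution n trust = solution_alt n trust := by
  have hnd := pv_nodup_range n
  simp only [solution, solution_alt]
  set R := PySem.List.pyRange 1 (n+1) with hRdef
  set P := trust.map (fun t => (pvFst t, pvSnd t)) with hPdef
  set pairs := PySem.Set.ofList P with hprdef
  set d := trust.foldl (fun d i => d.modify (pvFst i) PySem.Set.empty (fun s => PySem.Set.add s (pvSnd i)))
      (R.foldl (fun d i => d.insert i PySem.Set.empty) PySem.Dict.empty) with hddef
  have hmemP : ∀ a b : Int, (a, b) ∈ P ↔ ∃ t ∈ trust, pvFst t = a ∧ pvSnd t = b := by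
    intro a b
    rw [hPdef]
    simp only [List.mem_map, Prod.mk.injEq]
  have hmempairs : ∀ q : Int × Int, q ∈ pairs ↔ q ∈ P := fun q => PySem.Set.mem_ofList P q
  have hndpairs : pairs.Nodup := PySem.Set.nodup_ofList P
  have hfstP : ∀ q ∈ pairs, 1 ≤ q.1 ∧ q.1 ≤ n := by
    intro q hq
    obtain ⟨t, ht, h1, _⟩ := (hmemP q.1 q.2).mp ((hmempairs q).mp (by simpa using hq))
    rcases hpre t ht with ⟨_, ha, hb⟩
    omega
  -- keys of A's dict are exactly 1..n
  have hfstR : ∀ t ∈ trust, pvFst t ∈ R := by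
    intro t ht
    rcases hpre t ht with ⟨_, h1, h2⟩
    exact PySem.List.mem_pyRange_one.mpr ⟨h1, by omega⟩
  have hkeys0 : (R.foldl (fun (d : PySem.Dict Int (PySem.Set Int)) i => d.insert i PySem.Set.empty) PySem.Dict.empty).keys = R := by
    rw [PySem.Dict.keys_foldl_insert R (fun _ _ => PySem.Set.empty)]
    rw [PySem.Dict.keys_empty, PySem.Set.update_nil_left, PySem.Set.ofList_eq_self_of_nodup R hnd]
  have hkeys : d.keys = R := by
    rw [hddef, PySem.Dict.keys_foldl_modify_key trust pvFst PySem.Set.empty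
      (fun _ i => (fun s => PySem.Set.add s (pvSnd i)))]
    rw [hkeys0, PySem.Set.update_eq_append_filter]
    have hfil : (List.filter (fun y => !PySem.Set.contains R y) (PySem.Set.ofList (trust.map pvFst))) = [] := by
      rw [List.filter_eq_nil_iff]
      intro y hy
      have hy' : y ∈ trust.map pvFst := (PySem.Set.mem_ofList _ _).mp hy
      obtain ⟨t, ht, rfl⟩ := List.mem_map.mp hy'
      simp [hfstR t ht]
    rw [hfil, List.append_nil]
  have hitems : d.items = R.map (fun k => (k, d.getD k PySem.Set.empty)) := by
    rw [PySem.Dict.items_eq_map_keys d (by rw [hkeys]; exact hnd) PySem.Set.empty, hkeys]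
  -- membership in a slot of A's dict = membership of the pair in P
  have hout : ∀ k x : Int, x ∈ d.getD k PySem.Set.empty ↔ (k, x) ∈ P := by
    intro k x
    rw [hddef, pv_mem_fold]
    rw [pv_getD_d0 R PySem.Dict.empty (fun j => PySem.Dict.getD_empty j PySem.Set.empty) k]
    rw [hmemP]
    simp [PySem.Set.empty]
  -- slot emptiness
  have hempty : ∀ k : Int, (PySem.Set.len (d.getD k PySem.Set.empty) == 0) = true ↔ ∀ b : Int, (k, b) ∉ P := by
    intro k
    constructor
    · intro h b hb
      have h0 : PySem.Set.len (d.getD k PySem.Set.empty) = 0 := beq_iff_eq.mp h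
      have hne : d.getD k PySem.Set.empty = [] := by
        have h1 : ((d.getD k PySem.Set.empty).length : Int) = 0 := by
          simpa [PySem.Set.len, PySem.List.len] using h0
        exact List.length_eq_zero_iff.mp (by exact_mod_cast h1)
      have := (hout k b).mpr hb
      rw [hne] at this
      exact List.not_mem_nil this
    · intro h
      rcases hq : d.getD k PySem.Set.empty with _ | ⟨x, xs⟩
      · simp [PySem.Set.len, hq]
      · exfalso
        have hx : x ∈ d.getD k PySem.Set.empty := by rw [hq]; exact List.mem_cons_self
        exact h x ((hout k x).mp hx)
  -- B's counters
  have hodeg : ∀ p : Int,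
      (pairs.foldl (fun (d : PySem.Dict Int Int) q => d.insert q.1 (d.getD q.1 0 + 1)) PySem.Dict.empty).getD p 0
        = ((pairs.map Prod.fst).count p : Int) := by
    intro p
    have e1 : (pairs.foldl (fun (d : PySem.Dict Int Int) (q : Int × Int) => d.insert q.1 (d.getD q.1 0 + 1)) PySem.Dict.empty)
        = ((pairs.map Prod.fst).foldl (fun d x => d.insert x (d.getD x 0 + 1)) PySem.Dict.empty) :=
      pv_foldl_comp Prod.fst (fun (d : PySem.Dict Int Int) x => d.insert x (d.getD x 0 + 1)) pairs PySem.Dict.empty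
    rw [e1]
    rw [PySem.Dict.foldl_insert_getD_add_one_eq_counter, PySem.Dict.getD_counter]
  have hideg : ∀ p : Int,
      (pairs.foldl (fun (d : PySem.Dict Int Int) q => d.insert q.2 (d.getD q.2 0 + 1)) PySem.Dict.empty).getD p 0
        = ((pairs.map Prod.snd).count p : Int) := by
    intro p
    have e2 : (pairs.foldl (fun (d : PySem.Dict Int Int) (q : Int × Int) => d.insert q.2 (d.getD q.2 0 + 1)) PySem.Dict.empty)
        = ((pairs.map Prod.snd).foldl (fun d x => d.insert x (d.getD x 0 + 1)) PySem.Dict.empty) :=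
      pv_foldl_comp Prod.snd (fun (d : PySem.Dict Int Int) x => d.insert x (d.getD x 0 + 1)) pairs PySem.Dict.empty
    rw [e2]
    rw [PySem.Dict.foldl_insert_getD_add_one_eq_counter, PySem.Dict.getD_counter]
  have hod0 : ∀ k : Int, ((pairs.map Prod.fst).count k : Int) = 0 ↔ ∀ b : Int, (k, b) ∉ P := by
    intro k
    rw [show (((pairs.map Prod.fst).count k : Int) = 0) ↔ ((pairs.map Prod.fst).count k = 0) by exact_mod_cast Iff.rfl]
    rw [List.count_eq_zero]
    constructor
    · intro h b hb
      exact h (List.mem_map.mpr ⟨(k, b), (hmempairs _).mpr hb, rfl⟩)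
    · intro h hk
      obtain ⟨q, hq, hq1⟩ := List.mem_map.mp hk
      exact h q.2 (by rw [← hq1] at *; exact (hmempairs q).mp hq)
  rw [hitems, pv_findEmptyA_eq, pv_findB_eq n]
  simp only [hodeg, hideg]
  -- case on A's candidate search
  cases hA : R.find? (fun k => PySem.Set.len (d.getD k PySem.Set.empty) == 0) with
  | none =>
      have hnone : R.find? (fun p => (((pairs.map Prod.fst).count p : Int) == 0)
          && (((pairs.map Prod.snd).count p : Int) == n - 1)) = none := by
        rw [List.find?_eq_none]
        intro p hp hcon
        have h1 := (Bool.and_eq_true _ _).mp hcon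
        have h2 : ∀ b : Int, (p, b) ∉ P := (hod0 p).mp (beq_iff_eq.mp h1.1)
        have := (hempty p).mpr h2
        exact (List.find?_eq_none.mp hA p hp) this
      rw [hnone]
      rfl
  | some j =>
      have hjR : j ∈ R := List.mem_of_find?_eq_some hA
      have hjp := (PySem.List.mem_pyRange_one).mp hjR
      have hEj : ∀ b : Int, (j, b) ∉ P :=
        (hempty j).mp (by have h := List.find?_some hA; exact h)
      have hcard := pv_card_iff n j pairs hndpairs hfstP (hRdef ▸ hjR)
        (fun b hb => hEj b ((hmempairs _).mp hb))
      simp only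
      rw [if_neg (by simp; omega), pv_verifyA_eq]
      by_cases hV : ∀ k ∈ R, k ≠ j → (k, j) ∈ P
      · -- verification succeeds: both return j
        have hall : (R.all fun k => if k == j then !(PySem.Set.contains (d.getD k PySem.Set.empty) j)
              else PySem.Set.contains (d.getD k PySem.Set.empty) j) = true := by
          rw [List.all_eq_true]
          intro k hk
          by_cases hkj : k = j
          · subst hkj
            simp only [beq_self_eq_true, if_true, Bool.not_eq_true']
            rw [← Bool.not_eq_true, PySem.Set.contains_iff]
            intro hm
            exact hEj k ((hout k k).mp hm)
          · rw [if_neg (by simpa using hkj), PySem.Set.contains_iff, hout]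
            exact hV k hk hkj
        rw [hall, if_pos rfl]
        have hsame : ∀ k ∈ R, ((((pairs.map Prod.fst).count k : Int) == 0)
              && (((pairs.map Prod.snd).count k : Int) == n - 1))
            = (PySem.Set.len (d.getD k PySem.Set.empty) == 0) := by
          intro k hk
          by_cases hkj : k = j
          · subst hkj
            have h1 : ((pairs.map Prod.fst).count k : Int) = 0 := (hod0 k).mpr hEj
            have h2 : ((pairs.map Prod.snd).count k : Int) = n - 1 :=
              hcard.mpr (fun a ha haj => (hmempairs _).mpr (hV a (hRdef ▸ ha) haj))
            have h3 := (hempty k).mpr hEj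
            rw [h1, h2, h3]
            simp
          · have h1 : (k, j) ∈ P := hV k hk hkj
            have h2 : (((pairs.map Prod.fst).count k : Int) == 0) = false := by
              rw [beq_eq_false_iff_ne]
              intro h0
              exact (hod0 k).mp h0 j h1
            have h3 : (PySem.Set.len (d.getD k PySem.Set.empty) == 0) = false := by
              rw [← Bool.not_eq_true]
              intro h0
              exact (hempty k).mp h0 j h1
            rw [h2, h3, Bool.false_and]
        rw [pv_find?_congr _ _ R hsame, hA]
        rfl
      · -- verification fails: both return -1
        push_neg at hV
        obtain ⟨k0, hk0R, hk0j, hk0P⟩ := hV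
        have hall : (R.all fun k => if k == j then !(PySem.Set.contains (d.getD k PySem.Set.empty) j)
              else PySem.Set.contains (d.getD k PySem.Set.empty) j) = false := by
          rw [← Bool.not_eq_true, List.all_eq_true]
          intro hallt
          have := hallt k0 hk0R
          rw [if_neg (by simpa using hk0j), PySem.Set.contains_iff, hout] at this
          exact hk0P this
        rw [hall, if_neg (by simp)]
        have hnone : R.find? (fun p => (((pairs.map Prod.fst).count p : Int) == 0)
            && (((pairs.map Prod.snd).count p : Int) == n - 1)) = none := by
          rw [List.find?_eq_none]
          intro p hp hcon
          have h1 := (Bool.and_eq_true _ _).mp hcon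
          have hEp : ∀ b : Int, (p, b) ∉ P := (hod0 p).mp (beq_iff_eq.mp h1.1)
          have hcardp := pv_card_iff n p pairs hndpairs hfstP (hRdef ▸ hp)
            (fun b hb => hEp b ((hmempairs _).mp hb))
          have hallp : ∀ k ∈ R, k ≠ p → (k, p) ∈ P :=
            fun k hk hkp => (hmempairs _).mp (hcardp.mp (beq_iff_eq.mp h1.2) k (hRdef ▸ hk) hkp)
          by_cases hpj : p = j
          · subst hpj
            exact hk0P (hallp k0 hk0R hk0j)
          · have : (j, p) ∈ P := hallp j hjR (fun h => hpj h.symm)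
            exact hEj p this
        rw [hnone]
        rfl

-- ===== VERDICT (by name: the statement is the Claim_ definition above) =====
theorem solution_spec : Claim_equal_solution := by
  intro n trust _ hpre
  exact pv_main n trust hpre
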